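-- pv_equiv track=rewrite | github.com/Enzo-Demeulenaere/M1-ACT | TP2/final.py | configuration
-- ===== SOURCE A (Python) =====
-- def configuration (l):
--     if any(element == 0 for element in l):
--         config = 1
--     elif sum([abs(x) for x in l]) > sum(l):
--         config = (min([abs(x) for x in l if x<0])+1)
--     else:
--         config = -(max(l)+1)
--     return config
-- ===== SOURCE B (Python) =====
-- def configuration(l):
--     has_zero = False
--     min_abs_neg = None
--     maxv = None
--     for x in l:
--         if x == 0:
--             has_zero = True
--         if x < 0 and (min_abs_neg is None or -x < min_abs_neg):
--             min_abs_neg = -x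
--         if maxv is None or x > maxv:
--             maxv = x
--     if has_zero:
--         return 1
--     if min_abs_neg is not None:
--         return min_abs_neg + 1
--     return -(maxv + 1)
-- ===== Notes on version B (the rewrite author's own statement) =====
-- stated objective: alternative
-- what changed: Replaces A's four separate list traversals (any, two sums, min/max over fresh comprehensions) by a single pass maintaining has_zero, the running min of -x over negatives, and the running max, deciding afterwards; the sum(abs)>sum test becomes the equivalent has-a-negative flag.
import Mathlib
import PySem

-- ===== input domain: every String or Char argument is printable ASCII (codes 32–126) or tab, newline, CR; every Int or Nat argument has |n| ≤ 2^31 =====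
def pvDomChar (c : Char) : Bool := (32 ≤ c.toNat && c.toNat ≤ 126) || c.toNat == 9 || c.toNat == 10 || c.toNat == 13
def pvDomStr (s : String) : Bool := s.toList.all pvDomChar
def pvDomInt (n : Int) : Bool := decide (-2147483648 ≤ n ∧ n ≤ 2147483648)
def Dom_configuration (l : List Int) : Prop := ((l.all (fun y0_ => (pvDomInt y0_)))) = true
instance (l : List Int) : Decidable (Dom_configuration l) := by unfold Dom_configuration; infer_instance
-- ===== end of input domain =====

-- B replaces A's several traversals (any, two sums, min/max over fresh lists) by one
-- fold maintaining has_zero, the running min of -x over negatives, and the running max.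

-- ===== PORT A =====
def configuration (l : List Int) : Int :=
  if l.any (fun element => element == 0) then 1
  else if (l.map (fun x => |x|)).sum > l.sum then
    -- min([...]) raises on an empty list; the branch guard makes it nonempty, so getD 0 is unreachable
    ((PySem.List.min? ((l.filter (fun x => decide (x < 0))).map (fun x => |x|)) (fun y => y)).getD 0) + 1
  else
    -- max(l) raises ValueError on l = []; that input is excluded by Pre_configuration
    -(((PySem.List.max? l (fun y => y)).getD 0) + 1)

-- ===== PORT B =====
-- loop body of Source B: update (has_zero, min_abs_neg, maxv) for one element
def altStep (s : Bool × Option Int × Option Int) (x : Int) : Bool × Option Int × Option Int :=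
  (s.1 || (x == 0),
   (if x < 0 then
      (match s.2.1 with
       | none => some (-x)
       | some m => if -x < m then some (-x) else some m)
    else s.2.1),
   (match s.2.2 with
    | none => some x
    | some m => if x > m then some x else some m))

def configuration_alt (l : List Int) : Int :=
  let st := l.foldl altStep (false, none, none)
  if st.1 then 1
  else
    match st.2.1 with
    | some m => m + 1
    | none => -((st.2.2.getD 0) + 1)   -- maxv is None only for l = [], excluded by Pre_ (Source B raises there)

-- ===== PRECONDITION & SPEC =====
-- Pre_ excludes only the empty list, on which both Pythons raise (A: ValueError from max([]), B: TypeError).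
def Pre_configuration (l : List Int) : Prop := l ≠ []
instance (l : List Int) : Decidable (Pre_configuration l) := by unfold Pre_configuration; infer_instance
def pvWitness_configuration : List Int := [3, -2, 5]
def Spec_configuration (l : List Int) (out : Int) : Prop := out = configuration_alt l
instance (l : List Int) (out : Int) : Decidable (Spec_configuration l out) := by unfold Spec_configuration; infer_instance

-- ===== CLAIM (what is proved, stated in full; the proofs are below) =====
def Claim_equal_configuration : Prop := ∀ (l : List Int), Dom_configuration l → Pre_configuration l → Spec_configuration l (configuration l)

-- ===== LEMMAS AND PROOFS =====

-- the three components of B's fold, separated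
def mnStep (mn : Option Int) (x : Int) : Option Int :=
  if x < 0 then
    (match mn with
     | none => some (-x)
     | some m => if -x < m then some (-x) else some m)
  else mn

def mxStep (mx : Option Int) (x : Int) : Option Int :=
  match mx with
  | none => some x
  | some m => if x > m then some x else some m

theorem foldl_altStep_split (l : List Int) (hz : Bool) (mn mx : Option Int) :
    l.foldl altStep (hz, mn, mx) =
      (hz || l.any (fun x => x == 0), l.foldl mnStep mn, l.foldl mxStep mx) := by
  induction l generalizing hz mn mx with
  | nil => simp
  | cons x t ih =>
    simp only [List.foldl_cons, List.any_cons, altStep, ih]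
    simp [mnStep, mxStep, Bool.or_assoc]

theorem configuration_alt_eq (l : List Int) :
    configuration_alt l =
      if l.any (fun x => x == 0) then 1
      else
        match l.foldl mnStep none with
        | some m => m + 1
        | none => -((l.foldl mxStep none).getD 0 + 1) := by
  simp only [configuration_alt, foldl_altStep_split, Bool.false_or]

theorem foldl_mnStep_some (l : List Int) (m : Int) :
    l.foldl mnStep (some m) =
      some (((l.filter (fun x => decide (x < 0))).map (fun x => |x|)).foldl min m) := by
  induction l generalizing m with
  | nil => simp
  | cons x t ih =>
    by_cases hx : x < 0
    · simp only [List.foldl_cons, mnStep, if_pos hx, List.filter_cons, decide_eq_true hx,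
        if_pos trivial, List.map_cons, abs_of_neg hx]
      by_cases hlt : -x < m
      · rw [if_pos hlt, ih]
        congr 2
        omega
      · rw [if_neg hlt, ih]
        congr 2
        omega
    · simp only [List.foldl_cons, mnStep, if_neg hx, List.filter_cons]
      rw [ih]
      simp [hx]

theorem foldl_mnStep_none (l : List Int) :
    l.foldl mnStep none =
      PySem.List.min? ((l.filter (fun x => decide (x < 0))).map (fun x => |x|)) (fun y => y) := by
  induction l with
  | nil => simp [PySem.List.min?]
  | cons x t ih =>
    by_cases hx : x < 0
    · simp only [List.foldl_cons, mnStep, if_pos hx, List.filter_cons, decide_eq_true hx,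
        if_pos trivial, List.map_cons, abs_of_neg hx]
      rw [foldl_mnStep_some, PySem.List.min?_id_cons]
    · simp only [List.foldl_cons, mnStep, if_neg hx, List.filter_cons]
      rw [ih]
      simp [hx]

theorem foldl_mxStep_some (l : List Int) (m : Int) :
    l.foldl mxStep (some m) = some (l.foldl max m) := by
  induction l generalizing m with
  | nil => rfl
  | cons x t ih =>
    simp only [List.foldl_cons, mxStep]
    by_cases h : x > m
    · rw [if_pos h, ih]
      congr 2
      omega
    · rw [if_neg h, ih]
      congr 2
      omega

theorem foldl_mxStep_none (x : Int) (t : List Int) :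
    (x :: t).foldl mxStep none = PySem.List.max? (x :: t) (fun y => y) := by
  simp only [List.foldl_cons, mxStep, PySem.List.max?_id_cons]
  exact foldl_mxStep_some t x

theorem sum_abs_ge (l : List Int) : (l.map (fun x => |x|)).sum ≥ l.sum := by
  induction l with
  | nil => simp
  | cons y s ih =>
    simp only [List.map_cons, List.sum_cons]
    have := le_abs_self y
    omega

theorem sum_abs_gt_iff (l : List Int) :
    (l.map (fun x => |x|)).sum > l.sum ↔ ∃ x ∈ l, x < 0 := by
  induction l with
  | nil => simp
  | cons x t ih =>
    simp only [List.map_cons, List.sum_cons, List.mem_cons]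
    have hge := sum_abs_ge t
    constructor
    · intro h
      by_cases hx : x < 0
      · exact ⟨x, Or.inl rfl, hx⟩
      · rw [abs_of_nonneg (by omega)] at h
        obtain ⟨y, hy, hyneg⟩ := ih.mp (by omega)
        exact ⟨y, Or.inr hy, hyneg⟩
    · rintro ⟨y, hy | hy, hyneg⟩
      · subst hy
        rw [abs_of_neg hyneg]
        omega
      · have h1 : (t.map (fun x => |x|)).sum > t.sum := ih.mpr ⟨y, hy, hyneg⟩
        have := le_abs_self x
        omega

-- ===== VERDICT (by name: the statement is the Claim_ definition above) =====
theorem configuration_spec : Claim_equal_configuration := by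
  intro l _ hpre
  unfold Spec_configuration
  obtain ⟨x, t, rfl⟩ : ∃ x t, l = x :: t := by
    cases l with
    | nil => exact absurd rfl hpre
    | cons a b => exact ⟨a, b, rfl⟩
  rw [configuration_alt_eq]
  unfold configuration
  by_cases hz : (x :: t).any (fun e => e == 0)
  · rw [if_pos hz, if_pos hz]
  · rw [if_neg hz, if_neg hz]
    by_cases hneg : ∃ y ∈ (x :: t), y < 0
    · rw [if_pos ((sum_abs_gt_iff _).mpr hneg), foldl_mnStep_none]
      have hne : ((x :: t).filter (fun y => decide (y < 0))).map (fun y => |y|) ≠ [] := by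
        obtain ⟨y, hy, hyneg⟩ := hneg
        simp only [ne_eq, List.map_eq_nil_iff, List.filter_eq_nil_iff]
        intro h
        exact absurd (decide_eq_true hyneg) (by simpa using h y hy)
      obtain ⟨y, ys, hys⟩ : ∃ y ys, ((x :: t).filter (fun y => decide (y < 0))).map (fun y => |y|) = y :: ys := by
        cases h : ((x :: t).filter (fun y => decide (y < 0))).map (fun y => |y|) with
        | nil => exact absurd h hne
        | cons y ys => exact ⟨y, ys, rfl⟩
      rw [hys, PySem.List.min?_id_cons]
      rfl
    · rw [if_neg (fun h => hneg ((sum_abs_gt_iff _).mp h)), foldl_mnStep_none]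
      have hfe : ((x :: t).filter (fun y => decide (y < 0))) = [] := by
        simp only [List.filter_eq_nil_iff]
        intro y hy h
        exact hneg ⟨y, hy, of_decide_eq_true h⟩
      rw [hfe, List.map_nil,
        show PySem.List.min? ([] : List Int) (fun y => y) = none from rfl,
        foldl_mxStep_none]
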